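-- pv_equiv track=rewrite | github.com/FedericoIdarragaC/Algorithm-Test | canBeSplitted.py | canBeSplitted
-- ===== SOURCE A (Python) =====
-- def equalSplits(array,index):
--     sum_left = 0
--     sum_right = 0
--
--     for num in array[:index]:
--         sum_left += num
--
--     for num in array[index:]:
--         sum_right += num
--
--     return sum_right == sum_left
--
-- def canBeSplitted(array):
--     if len(array) <= 0:
--         return 0
--
--     flag = -1
--     for index in range(len(array)):
--         if(equalSplits(array,index)):
--             flag = 1
--     return flag
-- ===== SOURCE B (Python) =====
-- def canBeSplitted(array):
--     if len(array) <= 0: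
--         return 0
--     total = sum(array)
--     left = 0
--     for num in array:
--         if 2 * left == total:
--             return 1
--         left += num
--     return -1
-- ===== Notes on version B (the rewrite author's own statement) =====
-- stated objective: faster
-- what changed: Replaced the per-index recomputation of both half sums (equalSplits over slices) with a single pass keeping a running prefix sum and comparing 2*left against the precomputed total, returning early on the first split point.
import Mathlib
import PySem

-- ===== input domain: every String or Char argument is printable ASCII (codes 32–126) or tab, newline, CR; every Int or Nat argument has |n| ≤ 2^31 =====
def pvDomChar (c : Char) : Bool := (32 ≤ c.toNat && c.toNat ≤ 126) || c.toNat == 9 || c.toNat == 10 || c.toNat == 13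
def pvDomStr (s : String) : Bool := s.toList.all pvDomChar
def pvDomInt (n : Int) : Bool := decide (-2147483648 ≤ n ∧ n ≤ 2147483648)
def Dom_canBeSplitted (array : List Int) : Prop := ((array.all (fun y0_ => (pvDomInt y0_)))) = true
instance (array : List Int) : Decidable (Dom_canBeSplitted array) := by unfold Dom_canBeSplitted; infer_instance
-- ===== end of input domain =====

-- B replaces A's per-index recomputation of both half sums with one prefix-sum pass: O(n) vs O(n^2).


-- ===== PORT A =====
def equalSplits (array : List Int) (index : Int) : Bool :=
  let sum_left := (PySem.List.slice array none (some index)).foldl (· + ·) 0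
  let sum_right := (PySem.List.slice array (some index) none).foldl (· + ·) 0
  sum_right == sum_left

def canBeSplitted (array : List Int) : Int :=
  if array.length ≤ 0 then 0
  else
    (PySem.List.pyRange 0 (array.length : Int) 1).foldl
      (fun flag index => if equalSplits array index then 1 else flag) (-1)

-- ===== PORT B =====
def canBeSplittedGo (total left : Int) : List Int → Int
  | [] => -1
  | num :: rest => if 2 * left == total then 1 else canBeSplittedGo total (left + num) rest

def canBeSplitted_alt (array : List Int) : Int :=
  if array.length ≤ 0 then 0
  else canBeSplittedGo (array.foldl (· + ·) 0) 0 array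

-- ===== PRECONDITION & SPEC =====
def Spec_canBeSplitted (array : List Int) (out : Int) : Prop := out = canBeSplitted_alt array
instance (array : List Int) (out : Int) : Decidable (Spec_canBeSplitted array out) := by unfold Spec_canBeSplitted; infer_instance

-- ===== CLAIM (what is proved, stated in full; the proofs are below) =====
def Claim_equal_canBeSplitted : Prop := ∀ (array : List Int), Dom_canBeSplitted array → Spec_canBeSplitted array (canBeSplitted array)

-- ===== LEMMAS AND PROOFS =====

theorem foldl_sum_eq_sum (xs : List Int) (a : Int) : xs.foldl (· + ·) a = a + xs.sum := by
  induction xs generalizing a with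
  | nil => simp
  | cons x xs ih => simp [List.foldl, ih, add_assoc]

-- A's inner flag loop returns 1 iff some index satisfies p.
theorem foldl_flag (p : Int → Bool) (l : List Int) (flag : Int) :
    l.foldl (fun flag i => if p i then 1 else flag) flag
      = if l.any p then 1 else flag := by
  induction l generalizing flag with
  | nil => simp
  | cons x xs ih =>
    by_cases h : p x <;> simp [List.foldl, h, ih]

-- equalSplits at a natural index k is exactly the prefix-sum condition.
theorem equalSplits_iff (array : List Int) (k : ℕ) :
    equalSplits array (k : Int) = decide (2 * (array.take k).sum = array.sum) := by
  have hs : (array.take k).sum + (array.drop k).sum = array.sum := by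
    rw [← List.sum_append, List.take_append_drop]
  simp only [equalSplits, PySem.List.slice_to_natCast, PySem.List.slice_from_natCast,
    foldl_sum_eq_sum, zero_add]
  by_cases h : 2 * (array.take k).sum = array.sum
  · simp [show (array.drop k).sum = (array.take k).sum by omega, h]
  · have : (array.drop k).sum ≠ (array.take k).sum := by omega
    simp [this, h]

-- B's loop returns 1 iff some prefix of the remaining list satisfies the condition.
theorem canBeSplittedGo_eq (total : Int) (xs : List Int) (left : Int) :
    canBeSplittedGo total left xs
      = if ∃ k < xs.length, 2 * (left + (xs.take k).sum) = total then 1 else -1 := by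
  induction xs generalizing left with
  | nil => simp [canBeSplittedGo]
  | cons x xs ih =>
    by_cases h : 2 * left = total
    · rw [canBeSplittedGo, if_pos (by simpa using h),
        if_pos (⟨0, by simp, by simpa using h⟩ :
          ∃ k < (x :: xs).length, 2 * (left + ((x :: xs).take k).sum) = total)]
    · rw [canBeSplittedGo, if_neg (by simpa using h), ih]
      congr 1
      simp only [eq_iff_iff]
      constructor
      · rintro ⟨k, hk, hsum⟩
        exact ⟨k + 1, by simpa using hk, by simpa [add_assoc] using hsum⟩
      · rintro ⟨k, hk, hsum⟩
        cases k with
        | zero => exact absurd (by simpa using hsum) h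
        | succ j =>
          exact ⟨j, by simpa using hk, by simpa [add_assoc] using hsum⟩

theorem any_pyRange (array : List Int) :
    (PySem.List.pyRange 0 (array.length : Int) 1).any (equalSplits array)
      = decide (∃ k < array.length, 2 * (array.take k).sum = array.sum) := by
  rw [PySem.List.pyRange_one]
  simp only [sub_zero, Int.toNat_natCast, List.any_map]
  rw [Bool.eq_iff_iff]
  simp only [List.any_eq_true, List.mem_range, Function.comp_apply, zero_add,
    equalSplits_iff, decide_eq_true_eq]

-- ===== VERDICT (by name: the statement is the Claim_ definition above) =====
theorem canBeSplitted_spec : Claim_equal_canBeSplitted := by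
  intro array _
  unfold Spec_canBeSplitted canBeSplitted canBeSplitted_alt
  by_cases hn : array.length ≤ 0
  · simp [hn]
  · rw [if_neg hn, if_neg hn, foldl_flag, canBeSplittedGo_eq, any_pyRange,
      foldl_sum_eq_sum]
    simp
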